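-- pv_equiv track=rewrite | github.com/nimuthu3634-sketch/aegiscore | backend/app/utils/log_normalization.py | identify_event_type
-- ===== SOURCE A (Python) =====
-- from typing import Any
--
-- def normalize_source_tool(source_tool: str) -> str:
--     return source_tool.strip().lower().replace(" ", "_")
--
-- def identify_event_type(source_tool: str, raw_log: dict[str, Any], explicit_event_type: str | None) -> str:
--     if explicit_event_type:
--         return explicit_event_type.strip().lower().replace(" ", "_")
--
--     normalized_tool = normalize_source_tool(source_tool)
--     if normalized_tool == "nmap":
--         return "scan_result"
--     if normalized_tool == "hydra":
--         return "credential_assessment"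
--
--     message = " ".join(str(value) for value in raw_log.values()).lower()
--     if any(
--         keyword in message
--         for keyword in ("integrity", "checksum", "syscheck", "file changed", "file modified", "sudoers")
--     ):
--         return "file_integrity"
--     if any(
--         keyword in message
--         for keyword in ("useradd", "account created", "new user", "groupadd", "unauthorized user")
--     ):
--         return "user_account"
--     if any(keyword in message for keyword in ("login", "ssh", "rdp", "password", "sudo", "auth")):
--         return "authentication"
--     if any(keyword in message for keyword in ("dns", "tls", "network", "traffic", "port", "smb")):
--         return "network"
--     if any(keyword in message for keyword in ("malware", "quarantine", "trojan", "ransomware")):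
--         return "malware"
--     if any(keyword in message for keyword in ("policy", "config", "snapshot", "baseline", "drift")):
--         return "configuration"
--
--     return "other"
-- ===== SOURCE B (Python) =====
-- # Single left-to-right scan of the message: at each position test which keyword
-- # starts there and keep the best (lowest) category index seen, instead of one
-- # full substring search per keyword group.
-- CATEGORIES = ["file_integrity", "user_account", "authentication", "network",
--               "malware", "configuration"]
--
-- KEYWORDS = [
--     ("integrity", 0), ("checksum", 0), ("syscheck", 0), ("file changed", 0),
--     ("file modified", 0), ("sudoers", 0),
--     ("useradd", 1), ("account created", 1), ("new user", 1), ("groupadd", 1),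
--     ("unauthorized user", 1),
--     ("login", 2), ("ssh", 2), ("rdp", 2), ("password", 2), ("sudo", 2), ("auth", 2),
--     ("dns", 3), ("tls", 3), ("network", 3), ("traffic", 3), ("port", 3), ("smb", 3),
--     ("malware", 4), ("quarantine", 4), ("trojan", 4), ("ransomware", 4),
--     ("policy", 5), ("config", 5), ("snapshot", 5), ("baseline", 5), ("drift", 5),
-- ]
--
-- def identify_event_type(source_tool, raw_log, explicit_event_type):
--     if explicit_event_type:
--         return explicit_event_type.strip().lower().replace(" ", "_")
--     tool = source_tool.strip().lower().replace(" ", "_")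
--     if tool == "nmap":
--         return "scan_result"
--     if tool == "hydra":
--         return "credential_assessment"
--     message = " ".join(str(v) for v in raw_log.values()).lower()
--     best = len(CATEGORIES)
--     for i in range(len(message)):
--         for kw, cat in KEYWORDS:
--             if cat < best and message.startswith(kw, i):
--                 best = cat
--     return CATEGORIES[best] if best < len(CATEGORIES) else "other"
-- ===== Notes on version B (the rewrite author's own statement) =====
-- stated objective: alternative
-- what changed: Instead of running one full substring search per keyword group in a fixed if-chain, B makes a single left-to-right scan over the message, testing at each position which tabled keyword starts there and keeping the minimum (highest-priority) category index, then maps that index to its name.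
import Mathlib
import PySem

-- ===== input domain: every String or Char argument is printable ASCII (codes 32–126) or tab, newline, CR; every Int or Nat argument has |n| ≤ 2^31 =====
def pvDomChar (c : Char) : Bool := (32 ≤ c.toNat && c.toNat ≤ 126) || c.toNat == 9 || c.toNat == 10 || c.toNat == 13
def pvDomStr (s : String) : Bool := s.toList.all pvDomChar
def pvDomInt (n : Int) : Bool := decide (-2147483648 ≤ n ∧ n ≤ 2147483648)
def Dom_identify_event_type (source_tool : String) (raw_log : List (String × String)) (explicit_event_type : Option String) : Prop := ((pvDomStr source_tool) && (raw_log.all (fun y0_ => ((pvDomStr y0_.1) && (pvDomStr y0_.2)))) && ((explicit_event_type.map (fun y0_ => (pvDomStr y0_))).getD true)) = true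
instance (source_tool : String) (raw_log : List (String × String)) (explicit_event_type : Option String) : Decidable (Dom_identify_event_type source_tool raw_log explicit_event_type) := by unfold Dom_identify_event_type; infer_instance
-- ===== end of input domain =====

-- B replaces A's six per-group substring searches by one left-to-right scan of the message
-- that keeps the lowest-priority category index matched at any position (objective: alternative).

-- ===== PORT A =====
def normalize_source_tool (source_tool : String) : String :=
  PySem.Str.replace (PySem.Str.lower (PySem.Str.strip source_tool)) " " "_"

def identify_event_type (source_tool : String) (raw_log : List (String × String)) (explicit_event_type : Option String) : String :=
  let e := explicit_event_type.getD ""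
  if e.toList ≠ [] then
    PySem.Str.replace (PySem.Str.lower (PySem.Str.strip e)) " " "_"
  else
    let normalized_tool := normalize_source_tool source_tool
    if normalized_tool = "nmap" then "scan_result"
    else if normalized_tool = "hydra" then "credential_assessment"
    else
      let message := PySem.Str.lower (PySem.Str.join " " (PySem.Dict.mk raw_log).values)
      if ["integrity", "checksum", "syscheck", "file changed", "file modified", "sudoers"].any
          (fun k => PySem.Str.isIn k message) then "file_integrity"
      else if ["useradd", "account created", "new user", "groupadd", "unauthorized user"].any
          (fun k => PySem.Str.isIn k message) then "user_account"
      else if ["login", "ssh", "rdp", "password", "sudo", "auth"].any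
          (fun k => PySem.Str.isIn k message) then "authentication"
      else if ["dns", "tls", "network", "traffic", "port", "smb"].any
          (fun k => PySem.Str.isIn k message) then "network"
      else if ["malware", "quarantine", "trojan", "ransomware"].any
          (fun k => PySem.Str.isIn k message) then "malware"
      else if ["policy", "config", "snapshot", "baseline", "drift"].any
          (fun k => PySem.Str.isIn k message) then "configuration"
      else "other"

-- ===== PORT B =====
def pvCategories : List String :=
  ["file_integrity", "user_account", "authentication", "network", "malware", "configuration"]

def pvKeywords : List (String × Nat) :=
  [ ("integrity", 0), ("checksum", 0), ("syscheck", 0), ("file changed", 0),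
    ("file modified", 0), ("sudoers", 0),
    ("useradd", 1), ("account created", 1), ("new user", 1), ("groupadd", 1),
    ("unauthorized user", 1),
    ("login", 2), ("ssh", 2), ("rdp", 2), ("password", 2), ("sudo", 2), ("auth", 2),
    ("dns", 3), ("tls", 3), ("network", 3), ("traffic", 3), ("port", 3), ("smb", 3),
    ("malware", 4), ("quarantine", 4), ("trojan", 4), ("ransomware", 4),
    ("policy", 5), ("config", 5), ("snapshot", 5), ("baseline", 5), ("drift", 5) ]

-- message.startswith(kw, i) with 0 ≤ i is exactly: kw is a prefix of message[i:].
def identify_event_type_alt (source_tool : String) (raw_log : List (String × String)) (explicit_event_type : Option String) : String :=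
  let e := explicit_event_type.getD ""
  if e.toList ≠ [] then
    PySem.Str.replace (PySem.Str.lower (PySem.Str.strip e)) " " "_"
  else
    let tool := PySem.Str.replace (PySem.Str.lower (PySem.Str.strip source_tool)) " " "_"
    if tool = "nmap" then "scan_result"
    else if tool = "hydra" then "credential_assessment"
    else
      let message := PySem.Str.lower (PySem.Str.join " " (PySem.Dict.mk raw_log).values)
      let best := (List.range message.toList.length).foldl
        (fun b i => pvKeywords.foldl
          (fun b kv =>
            if kv.2 < b ∧ PySem.Chars.startswith (message.toList.drop i) kv.1.toList then kv.2 else b)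
          b)
        pvCategories.length
      if best < pvCategories.length then pvCategories.getD best "other" else "other"

-- ===== PRECONDITION & SPEC =====
def Spec_identify_event_type (source_tool : String) (raw_log : List (String × String)) (explicit_event_type : Option String) (out : String) : Prop := out = identify_event_type_alt source_tool raw_log explicit_event_type
instance (source_tool : String) (raw_log : List (String × String)) (explicit_event_type : Option String) (out : String) : Decidable (Spec_identify_event_type source_tool raw_log explicit_event_type out) := by unfold Spec_identify_event_type; infer_instance

-- ===== CLAIM (what is proved, stated in full; the proofs are below) =====
def Claim_equal_identify_event_type : Prop := ∀ (source_tool : String) (raw_log : List (String × String)) (explicit_event_type : Option String), Dom_identify_event_type source_tool raw_log explicit_event_type → Spec_identify_event_type source_tool raw_log explicit_event_type (identify_event_type source_tool raw_log explicit_event_type)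

-- ===== LEMMAS AND PROOFS =====

-- B's inner fold = a min-fold over the matched keywords' category indices.
theorem pv_inner_fold (p : String × Nat → Bool) :
    ∀ (kvs : List (String × Nat)) (b : Nat),
      kvs.foldl (fun b kv => if kv.2 < b ∧ p kv then kv.2 else b) b
      = ((kvs.filter p).map (·.2)).foldl min b := by
  intro kvs
  induction kvs with
  | nil => intro b; rfl
  | cons kv t ih =>
    intro b
    cases hp : p kv with
    | true =>
      have hinit : (if kv.2 < b then kv.2 else b) = min b kv.2 := by
        by_cases h : kv.2 < b
        · rw [if_pos h]; exact (Nat.min_eq_right (le_of_lt h)).symm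
        · rw [if_neg h]; exact (Nat.min_eq_left (Nat.le_of_not_lt h)).symm
      simp [hp, ih, hinit]
    | false =>
      simp [hp, ih]

-- nested min-folds flatten.
theorem pv_flat_fold (L : Nat → List Nat) :
    ∀ (l : List Nat) (b : Nat),
      l.foldl (fun b i => (L i).foldl min b) b = (l.flatMap L).foldl min b := by
  intro l
  induction l with
  | nil => intro b; rfl
  | cons a t ih => intro b; simp [List.foldl_append, ih]

theorem pv_foldl_min_mem : ∀ (l : List Nat) (b : Nat),
    l.foldl min b = b ∨ l.foldl min b ∈ l := by
  intro l
  induction l with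
  | nil => intro b; exact Or.inl rfl
  | cons a t ih =>
    intro b
    rcases ih (min b a) with h | h
    · rcases min_cases b a with ⟨he, _⟩ | ⟨he, _⟩
      · exact Or.inl (by rw [List.foldl_cons, h, he])
      · exact Or.inr (by rw [List.foldl_cons, h, he]; exact List.mem_cons_self)
    · exact Or.inr (List.mem_cons_of_mem a h)

theorem pv_foldl_min_le_init : ∀ (l : List Nat) (b : Nat), l.foldl min b ≤ b := by
  intro l
  induction l with
  | nil => intro b; exact le_refl b
  | cons a t ih => intro b; exact le_trans (ih (min b a)) (min_le_left b a)

theorem pv_foldl_min_le_mem : ∀ (l : List Nat) (b : Nat) (x : Nat), x ∈ l → l.foldl min b ≤ x := by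
  intro l
  induction l with
  | nil => intro b x hx; cases hx
  | cons a t ih =>
    intro b x hx
    rcases List.mem_cons.mp hx with rfl | hx
    · exact le_trans (pv_foldl_min_le_init t (min b x)) (min_le_right b x)
    · exact ih (min b a) x hx

-- a nonempty keyword occurs as a substring iff it starts at some scanned position.
theorem pv_pos_iff (kw msg : List Char) (hk : kw ≠ []) :
    (∃ i ∈ List.range msg.length, PySem.Chars.startswith (msg.drop i) kw = true)
    ↔ PySem.Chars.isIn kw msg = true := by
  rw [← PySem.Chars.exists_prefix_drop_iff_isIn]
  constructor
  · rintro ⟨i, _, h⟩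
    exact ⟨i, (PySem.Chars.startswith_iff _ _).mp h⟩
  · rintro ⟨j, hj⟩
    by_cases hjn : j < msg.length
    · exact ⟨j, List.mem_range.mpr hjn, (PySem.Chars.startswith_iff _ _).mpr hj⟩
    · exfalso
      rw [List.drop_eq_nil_of_le (le_of_not_gt hjn)] at hj
      exact hk (List.prefix_nil.mp hj)

-- the flattened matched-category list of B's scan.
def pvMatched (msg : List Char) : List Nat :=
  (List.range msg.length).flatMap
    (fun i => ((pvKeywords.filter (fun kv => PySem.Chars.startswith (msg.drop i) kv.1.toList)).map (·.2)))

theorem pv_mem_matched (msg : List Char) (c : Nat) :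
    c ∈ pvMatched msg ↔ ∃ kv ∈ pvKeywords, kv.2 = c ∧ PySem.Chars.isIn kv.1.toList msg = true := by
  unfold pvMatched
  simp only [List.mem_flatMap, List.mem_map, List.mem_filter, List.mem_range]
  constructor
  · rintro ⟨i, hi, kv, ⟨hmem, hsw⟩, hc⟩
    refine ⟨kv, hmem, hc, ?_⟩
    have hk : kv.1.toList ≠ [] := by
      revert hmem; unfold pvKeywords; intro hmem
      fin_cases hmem <;> decide
    exact (pv_pos_iff kv.1.toList msg hk).mp ⟨i, List.mem_range.mpr hi, hsw⟩
  · rintro ⟨kv, hmem, hc, hin⟩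
    have hk : kv.1.toList ≠ [] := by
      revert hmem; unfold pvKeywords; intro hmem
      fin_cases hmem <;> decide
    rcases (pv_pos_iff kv.1.toList msg hk).mpr hin with ⟨i, hi, hsw⟩
    exact ⟨i, List.mem_range.mp hi, kv, ⟨hmem, hsw⟩, hc⟩

theorem pv_matched_lt (msg : List Char) (c : Nat) (hc : c ∈ pvMatched msg) : c < 6 := by
  rcases (pv_mem_matched msg c).mp hc with ⟨kv, hmem, hcc, _⟩
  revert hmem; unfold pvKeywords; intro hmem
  subst hcc; fin_cases hmem <;> decide

theorem pv_result_eq (msg : List Char) (j : Nat) (hj : j < 6)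
    (hyes : j ∈ pvMatched msg) (hno : ∀ c < j, c ∉ pvMatched msg) :
    (pvMatched msg).foldl min 6 = j := by
  have hle : (pvMatched msg).foldl min 6 ≤ j := pv_foldl_min_le_mem _ 6 j hyes
  rcases pv_foldl_min_mem (pvMatched msg) 6 with h6 | hm
  · omega
  · by_contra hne
    exact hno _ (lt_of_le_of_ne hle hne) hm

theorem pv_result_none (msg : List Char) (hno : ∀ c, c ∉ pvMatched msg) :
    (pvMatched msg).foldl min 6 = 6 := by
  rcases pv_foldl_min_mem (pvMatched msg) 6 with h6 | hm
  · exact h6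
  · exact absurd hm (hno _)

-- bridge: category c is matched iff A's c-th group test fires.
theorem pv_bridge (msg : List Char) (c : Nat) (_hc : c < 6) :
    c ∈ pvMatched msg ↔
      ((pvKeywords.filter (fun kv => kv.2 == c)).map (·.1)).any
        (fun k => PySem.Chars.isIn k.toList msg) = true := by
  rw [pv_mem_matched]
  simp only [List.any_eq_true, List.mem_map, List.mem_filter, beq_iff_eq]
  constructor
  · rintro ⟨kv, hmem, hcc, hin⟩
    exact ⟨kv.1, ⟨kv, ⟨hmem, hcc⟩, rfl⟩, hin⟩
  · rintro ⟨k, ⟨kv, ⟨hmem, hcc⟩, rfl⟩, hin⟩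
    exact ⟨kv, hmem, hcc, hin⟩


def pvGroups : List (List String) :=
  [ ["integrity", "checksum", "syscheck", "file changed", "file modified", "sudoers"],
    ["useradd", "account created", "new user", "groupadd", "unauthorized user"],
    ["login", "ssh", "rdp", "password", "sudo", "auth"],
    ["dns", "tls", "network", "traffic", "port", "smb"],
    ["malware", "quarantine", "trojan", "ransomware"],
    ["policy", "config", "snapshot", "baseline", "drift"] ]

-- the c-th group of A is exactly the keywords tabled with category c.
theorem pv_bridge' (msg : List Char) (c : Nat) (hc : c < 6) :
    c ∈ pvMatched msg ↔
      (pvGroups.getD c []).any (fun k => PySem.Chars.isIn k.toList msg) = true := by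
  rw [pv_bridge msg c hc]
  interval_cases c <;> exact Iff.rfl

-- the core equality, over an arbitrary message string.
theorem pv_core (message : String) :
    (if ["integrity", "checksum", "syscheck", "file changed", "file modified", "sudoers"].any
          (fun k => PySem.Str.isIn k message) then "file_integrity"
      else if ["useradd", "account created", "new user", "groupadd", "unauthorized user"].any
          (fun k => PySem.Str.isIn k message) then "user_account"
      else if ["login", "ssh", "rdp", "password", "sudo", "auth"].any
          (fun k => PySem.Str.isIn k message) then "authentication"
      else if ["dns", "tls", "network", "traffic", "port", "smb"].any
          (fun k => PySem.Str.isIn k message) then "network"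
      else if ["malware", "quarantine", "trojan", "ransomware"].any
          (fun k => PySem.Str.isIn k message) then "malware"
      else if ["policy", "config", "snapshot", "baseline", "drift"].any
          (fun k => PySem.Str.isIn k message) then "configuration"
      else "other")
    = (let best := (List.range message.toList.length).foldl
        (fun b i => pvKeywords.foldl
          (fun b kv =>
            if kv.2 < b ∧ PySem.Chars.startswith (message.toList.drop i) kv.1.toList then kv.2 else b)
          b)
        pvCategories.length
      if best < pvCategories.length then pvCategories.getD best "other" else "other") := by
  have hfold : (List.range message.toList.length).foldl
        (fun b i => pvKeywords.foldl
          (fun b kv =>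
            if kv.2 < b ∧ PySem.Chars.startswith (message.toList.drop i) kv.1.toList then kv.2 else b)
          b)
        pvCategories.length
      = (pvMatched message.toList).foldl min 6 := by
    unfold pvMatched
    rw [← pv_flat_fold]
    show (List.range message.toList.length).foldl _ pvCategories.length = _
    have : pvCategories.length = 6 := by decide
    rw [this]
    refine List.foldl_ext _ _ _ (fun b i _ => ?_)
    exact pv_inner_fold (fun kv => PySem.Chars.startswith (message.toList.drop i) kv.1.toList) pvKeywords b
  rw [show pvCategories.length = 6 from rfl] at hfold ⊢
  rw [hfold]
  simp only [PySem.Str.isIn_eq]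
  have h0 := pv_bridge' message.toList 0 (by omega)
  have h1 := pv_bridge' message.toList 1 (by omega)
  have h2 := pv_bridge' message.toList 2 (by omega)
  have h3 := pv_bridge' message.toList 3 (by omega)
  have h4 := pv_bridge' message.toList 4 (by omega)
  have h5 := pv_bridge' message.toList 5 (by omega)
  simp only [pvGroups, List.getD] at h0 h1 h2 h3 h4 h5
  by_cases t0 : (["integrity", "checksum", "syscheck", "file changed", "file modified", "sudoers"].any
      (fun k => PySem.Chars.isIn k.toList message.toList)) = true
  · have hr : (pvMatched message.toList).foldl min 6 = 0 :=
      pv_result_eq _ 0 (by omega) (h0.mpr t0) (fun c hc => absurd hc (by omega))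
    simp [t0, hr, pvCategories]
  · by_cases t1 : (["useradd", "account created", "new user", "groupadd", "unauthorized user"].any
        (fun k => PySem.Chars.isIn k.toList message.toList)) = true
    · have hr : (pvMatched message.toList).foldl min 6 = 1 :=
        pv_result_eq _ 1 (by omega) (h1.mpr t1)
          (fun c _ hm => by interval_cases c; exact t0 (h0.mp hm))
      simp [t0, t1, hr, pvCategories]
    · by_cases t2 : (["login", "ssh", "rdp", "password", "sudo", "auth"].any
          (fun k => PySem.Chars.isIn k.toList message.toList)) = true
      · have hr : (pvMatched message.toList).foldl min 6 = 2 :=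
          pv_result_eq _ 2 (by omega) (h2.mpr t2)
            (fun c _ hm => by
                interval_cases c
                · exact t0 (h0.mp hm)
                · exact t1 (h1.mp hm))
        simp [t0, t1, t2, hr, pvCategories]
      · by_cases t3 : (["dns", "tls", "network", "traffic", "port", "smb"].any
            (fun k => PySem.Chars.isIn k.toList message.toList)) = true
        · have hr : (pvMatched message.toList).foldl min 6 = 3 :=
            pv_result_eq _ 3 (by omega) (h3.mpr t3)
              (fun c _ hm => by
                  interval_cases c
                  · exact t0 (h0.mp hm)
                  · exact t1 (h1.mp hm)
                  · exact t2 (h2.mp hm))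
          simp [t0, t1, t2, t3, hr, pvCategories]
        · by_cases t4 : (["malware", "quarantine", "trojan", "ransomware"].any
              (fun k => PySem.Chars.isIn k.toList message.toList)) = true
          · have hr : (pvMatched message.toList).foldl min 6 = 4 :=
              pv_result_eq _ 4 (by omega) (h4.mpr t4)
                (fun c _ hm => by
                    interval_cases c
                    · exact t0 (h0.mp hm)
                    · exact t1 (h1.mp hm)
                    · exact t2 (h2.mp hm)
                    · exact t3 (h3.mp hm))
            simp [t0, t1, t2, t3, t4, hr, pvCategories]
          · by_cases t5 : (["policy", "config", "snapshot", "baseline", "drift"].any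
                (fun k => PySem.Chars.isIn k.toList message.toList)) = true
            · have hr : (pvMatched message.toList).foldl min 6 = 5 :=
                pv_result_eq _ 5 (by omega) (h5.mpr t5)
                  (fun c _ hm => by
                      interval_cases c
                      · exact t0 (h0.mp hm)
                      · exact t1 (h1.mp hm)
                      · exact t2 (h2.mp hm)
                      · exact t3 (h3.mp hm)
                      · exact t4 (h4.mp hm))
              simp [t0, t1, t2, t3, t4, t5, hr, pvCategories]
            · have hr : (pvMatched message.toList).foldl min 6 = 6 :=
                pv_result_none _ (fun c hm => by
                  have hlt := pv_matched_lt message.toList c hm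
                  interval_cases c
                  · exact t0 (h0.mp hm)
                  · exact t1 (h1.mp hm)
                  · exact t2 (h2.mp hm)
                  · exact t3 (h3.mp hm)
                  · exact t4 (h4.mp hm)
                  · exact t5 (h5.mp hm))
              simp [t0, t1, t2, t3, t4, t5, hr]

-- ===== VERDICT (by name: the statement is the Claim_ definition above) =====
theorem identify_event_type_spec : Claim_equal_identify_event_type := by
  intro source_tool raw_log explicit_event_type _
  unfold Spec_identify_event_type
  show identify_event_type _ _ _ = _
  unfold identify_event_type identify_event_type_alt normalize_source_tool
  refine if_congr Iff.rfl rfl (if_congr Iff.rfl rfl (if_congr Iff.rfl rfl ?_))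
  exact pv_core _
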